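-- pv_equiv track=rewrite | github.com/Avery-Littlemore/common_sense_guide_to_dsa | chapter_20/5.py | sort_temps
-- ===== SOURCE A (Python) =====
-- def sort_temps(array):
--     hash_table = {}
--
--     for temperature in array:
--         if temperature in hash_table:
--             hash_table[temperature] += 1
--         else:
--             hash_table[temperature] = 1
--
--     sorted_temperatures = []
--     temperature = 95
--
--     while temperature <= 105:
--         if temperature in hash_table:
--             for i in range(hash_table[temperature]):
--                 sorted_temperatures.append(temperature)
--
--         temperature += 1
--
--     return sorted_temperatures
-- ===== SOURCE B (Python) =====
-- def sort_temps(array):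
--     return sorted(t for t in array if 95 <= t <= 105)
-- ===== Notes on version B (the rewrite author's own statement) =====
-- stated objective: idiomatic
-- what changed: Replaces the counting sort (per-element hash-table frequency build plus a walk of the fixed range 95..105) with a filter of the in-range temperatures followed by a comparison sort via the built-in sorted().
import Mathlib
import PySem

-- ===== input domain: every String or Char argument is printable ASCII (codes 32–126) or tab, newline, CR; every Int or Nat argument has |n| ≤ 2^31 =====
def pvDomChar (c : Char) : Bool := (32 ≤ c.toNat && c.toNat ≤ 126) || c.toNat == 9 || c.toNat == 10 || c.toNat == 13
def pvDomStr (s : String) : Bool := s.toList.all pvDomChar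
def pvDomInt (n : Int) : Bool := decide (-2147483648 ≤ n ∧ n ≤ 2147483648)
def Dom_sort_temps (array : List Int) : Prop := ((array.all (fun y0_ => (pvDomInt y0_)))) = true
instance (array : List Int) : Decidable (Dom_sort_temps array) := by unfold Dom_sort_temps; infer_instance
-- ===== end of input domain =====

-- B replaces A's counting sort (frequency table walked over 95..105) with a
-- filter of the in-range temperatures plus a comparison sort (built-in sorted); idiomatic, measured faster by constant factor.


-- ===== PORT A =====
-- one counting step of A's first loop: 'if t in ht: ht[t] += 1 else: ht[t] = 1'
def sortTempsStep (d : PySem.Dict Int Int) (t : Int) : PySem.Dict Int Int :=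
  if d.contains t then d.insert t (d.getD t 0 + 1) else d.insert t 1

-- A's while loop: 'while temperature <= 105: if temperature in hash_table: for i in range(...): append'
def sortTempsWhile (ht : PySem.Dict Int Int) (t : Int) (acc : List Int) : List Int :=
  if _h : t ≤ 105 then
    sortTempsWhile ht (t + 1)
      (if ht.contains t then
        (PySem.List.pyRange 0 (ht.getD t 0) 1).foldl (fun a _ => a ++ [t]) acc
       else acc)
  else acc
termination_by (106 - t).toNat
decreasing_by omega

def sort_temps (array : List Int) : List Int :=
  let hash_table := array.foldl sortTempsStep PySem.Dict.empty
  sortTempsWhile hash_table 95 []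

-- ===== PORT B =====
-- 'sorted(t for t in array if 95 <= t <= 105)'
def sort_temps_alt (array : List Int) : List Int :=
  PySem.List.sorted (array.filter (fun t => decide (95 ≤ t) && decide (t ≤ 105))) (fun x => x) false

-- ===== PRECONDITION & SPEC =====
def Spec_sort_temps (array : List Int) (out : List Int) : Prop := out = sort_temps_alt array
instance (array : List Int) (out : List Int) : Decidable (Spec_sort_temps array out) := by unfold Spec_sort_temps; infer_instance

-- ===== CLAIM (what is proved, stated in full; the proofs are below) =====
def Claim_equal_sort_temps : Prop := ∀ (array : List Int), Dom_sort_temps array → Spec_sort_temps array (sort_temps array)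

-- ===== LEMMAS AND PROOFS =====

-- A's table lookup after the build pass is exactly the occurrence count of the input list.
lemma sortTemps_build (xs : List Int) (d : PySem.Dict Int Int) (c : Int → Nat)
    (h : ∀ v, d.get? v = if c v = 0 then none else some ((c v : Nat) : Int)) :
    ∀ v, (xs.foldl sortTempsStep d).get? v =
      if c v + xs.count v = 0 then none else some (((c v + xs.count v : Nat) : Nat) : Int) := by
  induction xs generalizing d c with
  | nil => intro v; simpa using h v
  | cons x xs ih =>
    intro v
    have hstep : ∀ w, (sortTempsStep d x).get? w =
        if (fun u => c u + (if u = x then 1 else 0)) w = 0 then none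
        else some (((fun u => c u + (if u = x then 1 else 0)) w : Nat) : Int) := by
      intro w
      unfold sortTempsStep
      by_cases hc : d.contains x = true
      · have hx : c x ≠ 0 := by
          intro h0
          have := h x
          rw [if_pos h0] at this
          rw [(PySem.Dict.get?_eq_none_iff_contains d x).mp this] at hc
          exact Bool.false_ne_true hc
        have hgd : d.getD x 0 = ((c x : Nat) : Int) := by
          have := h x
          rw [if_neg hx] at this
          simp [PySem.Dict.getD, this]
        rw [if_pos hc, hgd]
        by_cases hw : w = x
        · subst hw
          rw [PySem.Dict.get?_insert_self]
          simp
        · rw [PySem.Dict.get?_insert_of_ne d _ hw, h w]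
          simp [hw]
      · have hx : c x = 0 := by
          by_contra h0
          have := h x
          rw [if_neg h0] at this
          have : d.contains x = true := by
            rcases (PySem.Dict.get?_eq_none_iff_contains d x) with ⟨_, h2⟩
            cases hcb : d.contains x
            · rw [(PySem.Dict.get?_eq_none_iff_contains d x).mpr hcb] at this; simp at this
            · rfl
          exact hc this
        rw [if_neg hc]
        by_cases hw : w = x
        · subst hw
          rw [PySem.Dict.get?_insert_self]
          simp [hx]
        · rw [PySem.Dict.get?_insert_of_ne d _ hw, h w]
          simp [hw]
    have := ih (sortTempsStep d x) _ hstep v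
    simp only [List.foldl_cons]
    rw [this]
    have hcount : c v + (if v = x then 1 else 0) + xs.count v = c v + (x :: xs).count v := by
      rw [List.count_cons]
      by_cases hv : v = x <;> simp [hv] <;> omega
    rw [hcount]

-- A's while loop with a count-table equals appending replicate (count u) u for each u in range.
lemma sortTemps_while (ht : PySem.Dict Int Int) (c : Int → Nat)
    (h : ∀ v, ht.get? v = if c v = 0 then none else some ((c v : Nat) : Int)) :
    ∀ (n : Nat) (t : Int) (acc : List Int), (106 - t).toNat ≤ n →
    sortTempsWhile ht t acc =
      acc ++ (PySem.List.pyRange t 106 1).flatMap (fun u => List.replicate (c u) u) := by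
  intro n
  induction n with
  | zero =>
    intro t acc hn
    have ht106 : 106 ≤ t := by omega
    unfold sortTempsWhile
    rw [dif_neg (by omega), PySem.List.pyRange_one_eq_nil ht106]
    simp
  | succ n ih =>
    intro t acc hn
    by_cases hle : t ≤ 105
    · have hacc : (if ht.contains t then
          (PySem.List.pyRange 0 (ht.getD t 0) 1).foldl (fun a _ => a ++ [t]) acc
         else acc) = acc ++ List.replicate (c t) t := by
        by_cases hc : ht.contains t = true
        · have hct : c t ≠ 0 := by
            intro h0
            have := h t
            rw [if_pos h0] at this
            rw [(PySem.Dict.get?_eq_none_iff_contains ht t).mp this] at hc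
            exact Bool.false_ne_true hc
          have hgd : ht.getD t 0 = ((c t : Nat) : Int) := by
            have := h t
            rw [if_neg hct] at this
            simp [PySem.Dict.getD, this]
          rw [if_pos hc, hgd,
            PySem.List.foldl_append_singleton_eq_map (fun _ => t) _ acc]
          congr 1
          rw [List.map_const']
          congr 1
          rw [PySem.List.length_pyRange_one]
          omega
        · have hct : c t = 0 := by
            by_contra h0
            have := h t
            rw [if_neg h0] at this
            cases hcb : ht.contains t
            · rw [(PySem.Dict.get?_eq_none_iff_contains ht t).mpr hcb] at this; simp at this
            · exact hc hcb
          rw [if_neg hc, hct]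
          simp
      unfold sortTempsWhile
      rw [dif_pos hle, hacc, ih (t + 1) _ (by omega),
        PySem.List.pyRange_one_cons (by omega : t < 106)]
      simp
    · unfold sortTempsWhile
      rw [dif_neg hle, PySem.List.pyRange_one_eq_nil (by omega : (106:Int) ≤ t)]
      simp

-- the flatMap of replicates over a ≤-sorted list of keys is ≤-sorted
lemma flatMap_replicate_pairwise (c : Int → Nat) (l : List Int) (hl : l.Pairwise (· ≤ ·)) :
    (l.flatMap (fun u => List.replicate (c u) u)).Pairwise (· ≤ ·) := by
  induction l with
  | nil => simp
  | cons x xs ih =>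
    rw [List.flatMap_cons, List.pairwise_append]
    rcases List.pairwise_cons.mp hl with ⟨hx, hxs⟩
    refine ⟨List.pairwise_replicate.mpr (Or.inr le_rfl), ih hxs, ?_⟩
    intro a ha b hb
    have hax := (List.eq_of_mem_replicate ha)
    rcases List.mem_flatMap.mp hb with ⟨u, hu, hbu⟩
    have hbu' := List.eq_of_mem_replicate hbu
    subst hax; subst hbu'
    exact hx _ hu

-- count of any v in the flatMap of replicates over a Nodup key list
lemma count_flatMap_replicate (c : Int → Nat) (l : List Int) (hl : l.Nodup) (v : Int) :
    (l.flatMap (fun u => List.replicate (c u) u)).count v = if v ∈ l then c v else 0 := by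
  induction l with
  | nil => simp
  | cons x xs ih =>
    rcases List.nodup_cons.mp hl with ⟨hx, hxs⟩
    rw [List.flatMap_cons, List.count_append, ih hxs, List.count_replicate]
    by_cases hv : v = x
    · subst hv
      simp [hx]
    · simp [hv, Ne.symm hv, List.mem_cons]

-- ===== VERDICT (by name: the statement is the Claim_ definition above) =====
theorem sort_temps_spec : Claim_equal_sort_temps := by
  intro array _
  unfold Spec_sort_temps sort_temps sort_temps_alt
  have hbuild := sortTemps_build array PySem.Dict.empty (fun _ => 0)
    (by intro v; simp [PySem.Dict.get?_empty])
  simp only [Nat.zero_add] at hbuild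
  rw [sortTemps_while _ (fun v => array.count v) (by intro v; simpa using hbuild v)
      ((106 - 95 : Int)).toNat 95 [] (le_refl _)]
  rw [List.nil_append]
  -- both sides are ≤-sorted and permutations of the filtered list, hence equal
  set p : Int → Bool := fun t => decide (95 ≤ t) && decide (t ≤ 105) with hp
  have hperm : (PySem.List.pyRange 95 106 1).flatMap
      (fun u => List.replicate (array.count u) u) |>.Perm (array.filter p) := by
    rw [List.perm_iff_count]
    intro v
    rw [count_flatMap_replicate _ _ (PySem.List.nodup_pyRange_one 95 106)]
    by_cases hm : p v = true
    · have hv : 95 ≤ v ∧ v ≤ 105 := by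
        simpa [hp] using hm
      rw [if_pos ((PySem.List.mem_pyRange_one).mpr ⟨hv.1, by omega⟩), List.count_filter hm]
    · have hv : ¬ (v ∈ PySem.List.pyRange 95 106 1) := by
        intro hvm
        rcases (PySem.List.mem_pyRange_one).mp hvm with ⟨h1, h2⟩
        exact hm (by simp [hp]; omega)
      rw [if_neg hv]
      have : v ∉ array.filter p := by
        intro hvf
        exact hm (List.of_mem_filter hvf)
      simp [List.count_eq_zero_of_not_mem this]
  have hperm2 : (PySem.List.pyRange 95 106 1).flatMap
      (fun u => List.replicate (array.count u) u) |>.Perm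
      (PySem.List.sorted (array.filter p) (fun x => x) false) :=
    hperm.trans (PySem.List.sorted_perm _ _ _).symm
  have hs1 : ((PySem.List.pyRange 95 106 1).flatMap
      (fun u => List.replicate (array.count u) u)).Pairwise (· ≤ ·) :=
    flatMap_replicate_pairwise _ _
      ((PySem.List.pairwise_lt_pyRange_one 95 106).imp (fun h => le_of_lt h))
  have hs2 : (PySem.List.sorted (array.filter p) (fun x => x) false).Pairwise (· ≤ ·) := by
    simpa using PySem.List.sorted_pairwise (array.filter p) (fun x => x)
  exact hperm2.eq_of_pairwise (fun a b _ _ h1 h2 => le_antisymm h1 h2) hs1 hs2
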